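-- pv_equiv track=rewrite | github.com/whyvic/Trabalho_FUP | sinonimos.py | constroi_descritores_semanticos
-- ===== SOURCE A (Python) =====
-- def constroi_descritores_semanticos(sentencas):
--     dicionario = {}
--     for sentenca in sentencas:
--         palavras_sentenca = []
--         for palavras in sentenca:
--             if palavras not in palavras_sentenca:
--                 palavras_sentenca.append(palavras)
--         for palavra_x in palavras_sentenca:
--             if palavra_x not in dicionario:
--                 dicionario[palavra_x] = {}
--             for palavra_seg in palavras_sentenca:
--                 if palavra_x != palavra_seg:
--                     if palavra_seg not in dicionario[palavra_x]:
--                         dicionario[palavra_x][palavra_seg] = 0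
--                     dicionario[palavra_x][palavra_seg] += 1
--     return dicionario
-- ===== SOURCE B (Python) =====
-- def constroi_descritores_semanticos(sentencas):
--     # first-occurrence order of all words across all sentences
--     palavras = []
--     for sentenca in sentencas:
--         for w in sentenca:
--             if w not in palavras:
--                 palavras.append(w)
--     deduplicadas = [list(dict.fromkeys(sentenca)) for sentenca in sentencas]
--     resultado = {}
--     for x in palavras:
--         linha = {}
--         for sd in deduplicadas:
--             if x in sd:
--                 for y in sd:
--                     if x != y:
--                         linha[y] = linha.get(y, 0) + 1
--         resultado[x] = linha
--     return resultado
-- ===== Notes on version B (the rewrite author's own statement) =====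
-- stated objective: alternative
-- what changed: B first collects the first-occurrence-ordered list of unique words and the deduplicated sentences, then computes each word's co-occurrence row independently with one pass over the sentences per word and assembles the rows, instead of A's single pass that mutates a nested dict entry-by-entry per sentence.
import Mathlib
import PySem

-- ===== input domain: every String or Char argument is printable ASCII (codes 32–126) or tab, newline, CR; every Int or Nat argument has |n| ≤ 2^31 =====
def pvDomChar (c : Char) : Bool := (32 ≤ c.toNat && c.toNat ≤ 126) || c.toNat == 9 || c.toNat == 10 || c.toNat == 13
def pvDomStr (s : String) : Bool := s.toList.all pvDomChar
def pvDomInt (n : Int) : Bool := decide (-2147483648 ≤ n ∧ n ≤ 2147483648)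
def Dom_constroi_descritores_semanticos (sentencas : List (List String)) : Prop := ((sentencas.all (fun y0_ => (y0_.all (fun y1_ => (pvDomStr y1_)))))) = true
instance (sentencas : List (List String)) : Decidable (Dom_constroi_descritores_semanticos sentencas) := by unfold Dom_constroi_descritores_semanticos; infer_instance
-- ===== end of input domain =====

-- B builds the first-occurrence word list, then computes each word's co-occurrence row
-- independently and assembles the rows, instead of A's single pass mutating a nested dict
-- per sentence (objective: alternative; same results, different traversal).

-- ===== PORT A =====
-- inner two statements of A's innermost loop:
--   if palavra_seg not in dicionario[palavra_x]: dicionario[palavra_x][palavra_seg] = 0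
--   dicionario[palavra_x][palavra_seg] += 1
def pvStepSeg (x : String) (d : PySem.Dict String (PySem.Dict String Int)) (seg : String) :
    PySem.Dict String (PySem.Dict String Int) :=
  if x ≠ seg then
    let inner := d.getD x PySem.Dict.empty
    let inner := if inner.contains seg then inner else inner.insert seg 0
    d.insert x (inner.insert seg (inner.getD seg 0 + 1))
  else d

-- body of 'for palavra_x in palavras_sentenca'
def pvStepX (sd : List String) (d : PySem.Dict String (PySem.Dict String Int)) (x : String) :
    PySem.Dict String (PySem.Dict String Int) :=
  let d := if d.contains x then d else d.insert x PySem.Dict.empty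
  sd.foldl (pvStepSeg x) d

-- body of 'for sentenca in sentencas' (palavras_sentenca = in-order dedup = PySem.Set.ofList)
def pvStepA (d : PySem.Dict String (PySem.Dict String Int)) (s : List String) :
    PySem.Dict String (PySem.Dict String Int) :=
  let sd := PySem.Set.ofList s
  sd.foldl (pvStepX sd) d

def constroi_descritores_semanticos (sentencas : List (List String)) :
    List (String × List (String × Int)) :=
  (sentencas.foldl pvStepA PySem.Dict.empty).items.map (fun p => (p.1, p.2.items))

-- ===== PORT B =====
-- per-word row: for sd in deduplicadas: if x in sd: for y in sd: if x != y: linha[y] = linha.get(y,0)+1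
def pvLinha (sentencas : List (List String)) (x : String) : PySem.Dict String Int :=
  sentencas.foldl
    (fun inn s =>
      let sd := PySem.Set.ofList s
      if x ∈ sd then
        sd.foldl (fun inn y => if x ≠ y then inn.insert y (inn.getD y 0 + 1) else inn) inn
      else inn)
    PySem.Dict.empty

def constroi_descritores_semanticos_alt (sentencas : List (List String)) :
    List (String × List (String × Int)) :=
  let palavras := sentencas.foldl (fun ws s => s.foldl PySem.Set.add ws) []
  let resultado := palavras.foldl (fun r x => r.insert x (pvLinha sentencas x)) PySem.Dict.empty
  resultado.items.map (fun p => (p.1, p.2.items))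

-- ===== PRECONDITION & SPEC =====
def Spec_constroi_descritores_semanticos (sentencas : List (List String)) (out : List (String × List (String × Int))) : Prop := out = constroi_descritores_semanticos_alt sentencas
instance (sentencas : List (List String)) (out : List (String × List (String × Int))) : Decidable (Spec_constroi_descritores_semanticos sentencas out) := by unfold Spec_constroi_descritores_semanticos; infer_instance

-- ===== CLAIM (what is proved, stated in full; the proofs are below) =====
def Claim_equal_constroi_descritores_semanticos : Prop := ∀ (sentencas : List (List String)), Dom_constroi_descritores_semanticos sentencas → Spec_constroi_descritores_semanticos sentencas (constroi_descritores_semanticos sentencas)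

-- ===== LEMMAS AND PROOFS =====

-- helper: the combined effect of A's two innermost statements on the inner dict
def pvBump (inn : PySem.Dict String Int) (y : String) : PySem.Dict String Int :=
  inn.insert y (inn.getD y 0 + 1)

theorem pvStepSeg_eq (x : String) (d : PySem.Dict String (PySem.Dict String Int)) (seg : String) :
    pvStepSeg x d seg = if x ≠ seg then d.insert x (pvBump (d.getD x PySem.Dict.empty) seg) else d := by
  unfold pvStepSeg pvBump
  by_cases hxs : x ≠ seg
  · simp only [if_pos hxs]
    by_cases hc : (d.getD x PySem.Dict.empty).contains seg = true
    · simp [hc]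
    · simp only [if_neg hc]
      rw [PySem.Dict.getD_insert_self, PySem.Dict.insert_insert_self,
        PySem.Dict.getD_of_not_contains (d.getD x PySem.Dict.empty) 0 (by simpa using hc)]
  · simp [hxs]

theorem pvSegfold_getD_self (l : List String) (x : String) :
    ∀ d : PySem.Dict String (PySem.Dict String Int),
      (l.foldl (pvStepSeg x) d).getD x PySem.Dict.empty
        = l.foldl (fun inn y => if x ≠ y then pvBump inn y else inn) (d.getD x PySem.Dict.empty) := by
  induction l with
  | nil => intro d; rfl
  | cons a l ih =>
    intro d
    simp only [List.foldl_cons, ih, pvStepSeg_eq]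
    by_cases h : x ≠ a
    · simp [h, PySem.Dict.getD_insert_self]
    · simp [h]

theorem pvSegfold_getD_ne (l : List String) (x x' : String) (hne : x' ≠ x) :
    ∀ d : PySem.Dict String (PySem.Dict String Int),
      (l.foldl (pvStepSeg x) d).getD x' PySem.Dict.empty = d.getD x' PySem.Dict.empty := by
  induction l with
  | nil => intro d; rfl
  | cons a l ih =>
    intro d
    simp only [List.foldl_cons, ih, pvStepSeg_eq]
    by_cases h : x ≠ a
    · simp [h, PySem.Dict.getD_insert_of_ne _ _ _ hne]
    · simp [h]

theorem pvSegfold_keys (l : List String) (x : String) :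
    ∀ d : PySem.Dict String (PySem.Dict String Int), d.contains x = true →
      (l.foldl (pvStepSeg x) d).keys = d.keys := by
  induction l with
  | nil => intro d _; rfl
  | cons a l ih =>
    intro d hc
    simp only [List.foldl_cons, pvStepSeg_eq]
    by_cases h : x ≠ a
    · simp only [if_pos h]
      rw [ih _ (by simp [PySem.Dict.contains_insert_self]),
        PySem.Dict.keys_insert_of_contains _ _ hc]
    · simp only [if_neg h]; exact ih _ hc

theorem pvStepX_getD (sd : List String) (d : PySem.Dict String (PySem.Dict String Int)) (x x' : String) :
    (pvStepX sd d x).getD x' PySem.Dict.empty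
      = if x' = x then sd.foldl (fun inn y => if x ≠ y then pvBump inn y else inn) (d.getD x PySem.Dict.empty)
        else d.getD x' PySem.Dict.empty := by
  unfold pvStepX
  have hens : ∀ x'', ((if d.contains x then d else d.insert x PySem.Dict.empty).getD x'' PySem.Dict.empty)
      = d.getD x'' PySem.Dict.empty := by
    intro x''
    by_cases hc : d.contains x = true
    · simp [hc]
    · simp only [if_neg hc]
      by_cases hx : x'' = x
      · subst hx
        rw [PySem.Dict.getD_insert_self,
          PySem.Dict.getD_of_not_contains _ _ (by simpa using hc)]
      · rw [PySem.Dict.getD_insert_of_ne _ _ _ hx]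
  by_cases hx : x' = x
  · subst hx
    rw [if_pos rfl, pvSegfold_getD_self, hens]
  · rw [if_neg hx, pvSegfold_getD_ne _ _ _ hx, hens]

theorem pvStepX_keys (sd : List String) (d : PySem.Dict String (PySem.Dict String Int)) (x : String) :
    (pvStepX sd d x).keys = PySem.Set.add d.keys x := by
  unfold pvStepX
  by_cases hc : d.contains x = true
  · simp only [if_pos hc]
    rw [pvSegfold_keys _ _ _ hc, PySem.Set.add_of_mem ((PySem.Dict.contains_iff_mem_keys _ _).1 hc)]
  · simp only [if_neg hc]
    rw [pvSegfold_keys _ _ _ (PySem.Dict.contains_insert_self _ _ _),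
      PySem.Dict.keys_insert_of_not_contains _ _ (by simpa using hc),
      PySem.Set.add_of_not_mem
        (fun hmem => absurd ((PySem.Dict.contains_iff_mem_keys _ _).2 hmem) (by simpa using hc))]

theorem pvXfold_getD (sd : List String) (x : String) :
    ∀ (l : List String), l.Nodup → ∀ d : PySem.Dict String (PySem.Dict String Int),
      (l.foldl (pvStepX sd) d).getD x PySem.Dict.empty
        = if x ∈ l then sd.foldl (fun inn y => if x ≠ y then pvBump inn y else inn) (d.getD x PySem.Dict.empty)
          else d.getD x PySem.Dict.empty := by
  intro l
  induction l with
  | nil => intro _ d; simp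
  | cons a l ih =>
    intro hnd d
    have hnd' := hnd.of_cons
    simp only [List.foldl_cons]
    by_cases hx : x = a
    · subst hx
      have hxl : x ∉ l := (List.nodup_cons.1 hnd).1
      rw [ih hnd' _, if_neg hxl, pvStepX_getD, if_pos rfl]
      simp
    · rw [ih hnd' _, pvStepX_getD, if_neg hx]
      simp [List.mem_cons, hx]

theorem pvXfold_keys (sd : List String) :
    ∀ (l : List String) (d : PySem.Dict String (PySem.Dict String Int)),
      (l.foldl (pvStepX sd) d).keys = PySem.Set.update d.keys l := by
  intro l
  induction l with
  | nil => intro d; rfl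
  | cons a l ih =>
    intro d
    rw [List.foldl_cons, ih, pvStepX_keys, PySem.Set.update_cons]

theorem pvUpdate_ofList (ks : PySem.Set String) (s : List String) :
    ks.update (PySem.Set.ofList s) = ks.update s := by
  rw [PySem.Set.update_eq_append_filter, PySem.Set.update_eq_append_filter, PySem.Set.ofList_ofList]

theorem pvStepA_getD (d : PySem.Dict String (PySem.Dict String Int)) (s : List String) (x : String) :
    (pvStepA d s).getD x PySem.Dict.empty
      = (if x ∈ PySem.Set.ofList s then
           (PySem.Set.ofList s).foldl (fun inn y => if x ≠ y then pvBump inn y else inn) (d.getD x PySem.Dict.empty)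
         else d.getD x PySem.Dict.empty) := by
  unfold pvStepA
  rw [pvXfold_getD _ _ _ (PySem.Set.nodup_ofList s)]

theorem pvStepA_keys (d : PySem.Dict String (PySem.Dict String Int)) (s : List String) :
    (pvStepA d s).keys = PySem.Set.update d.keys s := by
  unfold pvStepA
  rw [pvXfold_keys, pvUpdate_ofList]

theorem pvAfold_getD (ss : List (List String)) (x : String) :
    ∀ d : PySem.Dict String (PySem.Dict String Int),
      (ss.foldl pvStepA d).getD x PySem.Dict.empty
        = ss.foldl
            (fun inn s =>
              let sd := PySem.Set.ofList s
              if x ∈ sd then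
                sd.foldl (fun inn y => if x ≠ y then pvBump inn y else inn) inn
              else inn)
            (d.getD x PySem.Dict.empty) := by
  induction ss with
  | nil => intro d; rfl
  | cons s ss ih =>
    intro d
    simp only [List.foldl_cons, ih, pvStepA_getD]

theorem pvAfold_keys (ss : List (List String)) :
    ∀ d : PySem.Dict String (PySem.Dict String Int),
      (ss.foldl pvStepA d).keys = ss.foldl (fun ks s => PySem.Set.update ks s) d.keys := by
  induction ss with
  | nil => intro d; rfl
  | cons s ss ih =>
    intro d
    rw [List.foldl_cons, ih, pvStepA_keys, List.foldl_cons]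

-- A's final dict looked up at x is exactly B's per-word row
theorem pvA_getD_eq_linha (ss : List (List String)) (x : String) :
    ((ss.foldl pvStepA PySem.Dict.empty).getD x PySem.Dict.empty) = pvLinha ss x := by
  rw [pvAfold_getD]
  unfold pvLinha pvBump
  rfl

-- the word list B builds is A's key list
theorem pvWords_eq (ss : List (List String)) :
    (ss.foldl pvStepA PySem.Dict.empty).keys
      = ss.foldl (fun ws s => s.foldl PySem.Set.add ws) [] := by
  rw [pvAfold_keys]
  rfl

theorem pvWords_nodup (ss : List (List String)) :
    (ss.foldl (fun ws s => s.foldl PySem.Set.add ws) ([] : PySem.Set String)).Nodup := by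
  suffices h : ∀ ws : PySem.Set String, ws.Nodup →
      (ss.foldl (fun ws s => s.foldl PySem.Set.add ws) ws).Nodup by
    exact h [] List.nodup_nil
  induction ss with
  | nil => intro ws hws; exact hws
  | cons s ss ih =>
    intro ws hws
    exact ih _ (PySem.Set.nodup_update _ s hws)

theorem pvMain (ss : List (List String)) :
    constroi_descritores_semanticos ss = constroi_descritores_semanticos_alt ss := by
  unfold constroi_descritores_semanticos constroi_descritores_semanticos_alt
  have hwords := pvWords_eq ss
  have hnd : (ss.foldl pvStepA PySem.Dict.empty).keys.Nodup := by
    rw [hwords]; exact pvWords_nodup ss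
  have hA : (ss.foldl pvStepA PySem.Dict.empty).items
      = (ss.foldl (fun ws s => s.foldl PySem.Set.add ws) []).map
          (fun k => (k, pvLinha ss k)) := by
    rw [PySem.Dict.items_eq_map_keys _ hnd PySem.Dict.empty, hwords]
    exact List.map_congr_left (fun k _ => by rw [pvA_getD_eq_linha])
  have hB : ((ss.foldl (fun ws s => s.foldl PySem.Set.add ws) []).foldl
        (fun r x => r.insert x (pvLinha ss x)) PySem.Dict.empty).items
      = (ss.foldl (fun ws s => s.foldl PySem.Set.add ws) []).map
          (fun k => (k, pvLinha ss k)) := by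
    rw [PySem.Dict.items_foldl_insert_fresh _ (fun a => a) (fun a => pvLinha ss a) _
        (fun a _ => PySem.Dict.contains_empty a)
        (by simpa using pvWords_nodup ss)]
    rfl
  rw [hA]
  dsimp only
  rw [hB]

-- ===== VERDICT (by name: the statement is the Claim_ definition above) =====
theorem constroi_descritores_semanticos_spec : Claim_equal_constroi_descritores_semanticos := by
  intro sentencas _
  unfold Spec_constroi_descritores_semanticos
  exact pvMain sentencas
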